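-- pv_equiv track=rewrite | github.com/Protonk/BIDDER | experiments/acm-champernowne/base10/art/fabric/noising/noising_permutation.py | n_primes_digits
-- ===== SOURCE A (Python) =====
-- def n_primes_digits(n, target, prime_cache=None):
--     parts = []
--     total = 0
--     if n == 1:
--         for p in prime_cache:
--             s = str(p)
--             parts.append(s)
--             total += len(s)
--             if total >= target:
--                 break
--     else:
--         k = 1
--         while total < target:
--             if k % n != 0:
--                 s = str(n * k)
--                 parts.append(s)
--                 total += len(s)
--             k += 1
--     return [int(c) for c in ''.join(parts)[:target]]
-- ===== SOURCE B (Python) =====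
-- def n_primes_digits(n, target, prime_cache=None):
--     # Different algorithm: digits are produced arithmetically (repeated divmod by 10,
--     # no strings), and for n != 1 the j-th emitted multiplier is computed by the
--     # closed-form rank formula k_j = j + (j-1)//(n-1) (the j-th positive integer not
--     # divisible by n), so the trial-and-skip modulo filter disappears.  The consumer
--     # checks the collected length BEFORE producing the next number.
--     def digits(v):
--         if v == 0:
--             return [0]
--         ds = []
--         while v > 0:
--             v, r = divmod(v, 10)
--             ds.append(r)
--         ds.reverse()
--         return ds
--
--     result = []
--     if n == 1:
--         it = iter(prime_cache)
--         while len(result) < target: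
--             try:
--                 p = next(it)
--             except StopIteration:
--                 break
--             result += digits(p)
--     else:
--         j = 1
--         while len(result) < target:
--             k = j + (j - 1) // (n - 1)
--             result += digits(n * k)
--             j += 1
--     return result[:target]
-- ===== Notes on version B (the rewrite author's own statement) =====
-- stated objective: alternative
-- what changed: B drops A's string machinery and skip-loop entirely: digits are extracted arithmetically by repeated divmod-by-10 (no str/join/int(c)), and for n != 1 the j-th emitted multiplier comes from the closed-form rank formula k = j + (j-1)//(n-1) (the j-th positive integer not divisible by n), so the modulo trial-and-skip filter disappears; one length-checked consumer loop replaces A's two accumulate-then-test branch loops.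
-- intended difference: For n==1 with a negative target and a cache whose first element has more digits than -target, A consumes that element before checking and returns its leading digits, while B checks before consuming and returns [] (matching A's own n!=1 branch for non-positive targets), the intended 'no digits requested' result. — e.g. on n_primes_digits(1, -1, some [12]): A returns [1], B returns []
-- outside the precondition, e.g. on n_primes_digits(1, 1, [2, -3]): A returns [2], B returns [2]
import Mathlib
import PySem

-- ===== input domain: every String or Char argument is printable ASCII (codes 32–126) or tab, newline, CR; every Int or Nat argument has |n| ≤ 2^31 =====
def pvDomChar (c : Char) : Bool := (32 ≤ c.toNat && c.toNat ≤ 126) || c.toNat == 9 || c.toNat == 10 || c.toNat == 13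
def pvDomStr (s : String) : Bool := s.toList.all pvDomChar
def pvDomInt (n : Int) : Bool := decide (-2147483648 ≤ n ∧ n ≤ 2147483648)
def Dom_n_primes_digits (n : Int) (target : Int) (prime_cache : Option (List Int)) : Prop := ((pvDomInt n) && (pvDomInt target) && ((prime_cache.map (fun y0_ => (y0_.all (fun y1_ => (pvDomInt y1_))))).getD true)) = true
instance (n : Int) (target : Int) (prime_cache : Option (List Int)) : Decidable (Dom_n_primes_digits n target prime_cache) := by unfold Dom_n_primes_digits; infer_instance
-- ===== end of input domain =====

-- B replaces A's string building and modulo skip-loop by arithmetic digit extraction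
-- (repeated divmod by 10) and, for n ≠ 1, a closed-form rank formula for the j-th
-- emitted multiplier (objective: alternative algorithm, same cost). Return value only;
-- neither program mutates its arguments.

-- ===== PORT A =====
-- int(c) for a single character (Pre_ guarantees only digit characters reach it)
def pvDigit (c : Char) : Int := (PySem.Int.ofChars? [c]).getD 0

-- 'for p in prime_cache: parts.append(str(p)); total += len(s); if total >= target: break'
def pvAPrimes (target : Int) : List Int → Int → List (List Char) → List (List Char)
  | [], _, parts => parts
  | p :: ps, total, parts =>
    let s := PySem.Int.toChars p
    if target ≤ total + (s.length : Int) then parts ++ [s]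
    else pvAPrimes target ps (total + (s.length : Int)) (parts ++ [s])

-- 'k = 1; while total < target: if k % n != 0: append str(n*k); k += 1' (fueled; the fuel
-- 2*target.toNat+2 is a totality guard only — it suffices whenever the Python loop terminates)
def pvAMults (n target : Int) : Nat → Int → Int → List (List Char) → List (List Char)
  | 0, _, _, parts => parts
  | fuel + 1, k, total, parts =>
    if total < target then
      if PySem.Int.mod k n ≠ 0 then
        let s := PySem.Int.toChars (n * k)
        pvAMults n target fuel (k + 1) (total + (s.length : Int)) (parts ++ [s])
      else pvAMults n target fuel (k + 1) total parts
    else parts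

def n_primes_digits (n : Int) (target : Int) (prime_cache : Option (List Int)) : List Int :=
  let parts : List (List Char) :=
    if n = 1 then pvAPrimes target (prime_cache.getD []) 0 []
    else pvAMults n target (2 * target.toNat + 2) 1 0 []
  (PySem.List.slice parts.flatten none (some target)).map pvDigit

-- ===== PORT B =====
-- 'ds = []; while v > 0: v, r = divmod(v, 10); ds.append(r)' (fuel v.toNat suffices: v
-- strictly decreases each step, so at most v.toNat iterations run)
def pvDigitsCore : Nat → Int → List Int → List Int
  | 0, _, ds => ds
  | fuel + 1, v, ds =>
    if 0 < v then pvDigitsCore fuel (PySem.Int.floordiv v 10) (ds ++ [PySem.Int.mod v 10])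
    else ds

-- 'def digits(v): if v == 0: return [0]; … ds.reverse(); return ds'
def pvDigitsB (v : Int) : List Int :=
  if v = 0 then [0] else (pvDigitsCore v.toNat v []).reverse

-- 'while len(result) < target: try: p = next(it) except StopIteration: break; result += digits(p)'
def pvBPrimes (target : Int) (xs : List Int) (res : List Int) : List Int :=
  if (res.length : Int) < target then
    match xs with
    | [] => res
    | p :: ps => pvBPrimes target ps (res ++ pvDigitsB p)
  else res

-- 'j = 1; while len(result) < target: k = j + (j-1)//(n-1); result += digits(n*k); j += 1'
-- (fueled; each iteration adds at least one digit, so target.toNat+1 suffices)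
def pvBMults (n target : Int) : Nat → Int → List Int → List Int
  | 0, _, res => res
  | fuel + 1, j, res =>
    if (res.length : Int) < target then
      pvBMults n target fuel (j + 1)
        (res ++ pvDigitsB (n * (j + PySem.Int.floordiv (j - 1) (n - 1))))
    else res

def n_primes_digits_alt (n : Int) (target : Int) (prime_cache : Option (List Int)) : List Int :=
  let res : List Int :=
    if n = 1 then pvBPrimes target (prime_cache.getD []) []
    else pvBMults n target (target.toNat + 1) 1 []
  PySem.List.slice res none (some target)

-- ===== PRECONDITION & SPEC =====
-- Pre_ excludes n==1 calls with a missing cache (A raises TypeError) or with a negative cache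
-- element (a consumed '-' character makes int(c) raise ValueError; trailing negative elements
-- A never consumes are excluded with them), and n ≤ 0 with target > 0 (ZeroDivisionError /
-- ValueError / divergence).
def Pre_n_primes_digits (n : Int) (target : Int) (prime_cache : Option (List Int)) : Prop :=
  (n = 1 → prime_cache.isSome = true ∧ ∀ p ∈ prime_cache.getD [], 0 ≤ p) ∧
  (n ≠ 1 → 2 ≤ n ∨ target ≤ 0)
instance (n : Int) (target : Int) (prime_cache : Option (List Int)) : Decidable (Pre_n_primes_digits n target prime_cache) := by unfold Pre_n_primes_digits; infer_instance
def pvWitness_n_primes_digits : Int × Int × Option (List Int) := (1, 3, some [2, 3, 5])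

-- For n==1 with a negative target and a cache whose first element has more digits than -target,
-- A consumes that element before checking and returns its leading digits, while B checks the
-- length before consuming and returns [] — matching A's own n≠1 branch for non-positive
-- targets, the intended 'no digits requested' result.
def D_n_primes_digits (n : Int) (target : Int) (prime_cache : Option (List Int)) : Prop :=
  n = 1 ∧ target < 0 ∧
    0 < target + ((PySem.Int.toChars ((prime_cache.getD []).headD 0)).length : Int)
instance (n : Int) (target : Int) (prime_cache : Option (List Int)) : Decidable (D_n_primes_digits n target prime_cache) := by unfold D_n_primes_digits; infer_instance

def Spec_n_primes_digits (n : Int) (target : Int) (prime_cache : Option (List Int)) (out : List Int) : Prop := ¬ D_n_primes_digits n target prime_cache → out = n_primes_digits_alt n target prime_cache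
instance (n : Int) (target : Int) (prime_cache : Option (List Int)) (out : List Int) : Decidable (Spec_n_primes_digits n target prime_cache out) := by unfold Spec_n_primes_digits; infer_instance

def pvDiffWitness_n_primes_digits : Int × Int × Option (List Int) := (1, -1, some [12])
def pvDiffWitnessOut_n_primes_digits : (List Int) × (List Int) := ([1], [])

-- ===== CLAIM (what is proved, stated in full; the proofs are below) =====
def Claim_unchanged_n_primes_digits : Prop := ∀ (n : Int) (target : Int) (prime_cache : Option (List Int)), Dom_n_primes_digits n target prime_cache → Pre_n_primes_digits n target prime_cache → Spec_n_primes_digits n target prime_cache (n_primes_digits n target prime_cache)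
def Claim_changed_n_primes_digits : Prop := Dom_n_primes_digits (pvDiffWitness_n_primes_digits.1) (pvDiffWitness_n_primes_digits.2.1) (pvDiffWitness_n_primes_digits.2.2) ∧ Pre_n_primes_digits (pvDiffWitness_n_primes_digits.1) (pvDiffWitness_n_primes_digits.2.1) (pvDiffWitness_n_primes_digits.2.2) ∧ D_n_primes_digits (pvDiffWitness_n_primes_digits.1) (pvDiffWitness_n_primes_digits.2.1) (pvDiffWitness_n_primes_digits.2.2) ∧ n_primes_digits (pvDiffWitness_n_primes_digits.1) (pvDiffWitness_n_primes_digits.2.1) (pvDiffWitness_n_primes_digits.2.2) = pvDiffWitnessOut_n_primes_digits.1 ∧ n_primes_digits_alt (pvDiffWitness_n_primes_digits.1) (pvDiffWitness_n_primes_digits.2.1) (pvDiffWitness_n_primes_digits.2.2) = pvDiffWitnessOut_n_primes_digits.2 ∧ pvDiffWitnessOut_n_primes_digits.1 ≠ pvDiffWitnessOut_n_primes_digits.2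
def Claim_exact_n_primes_digits : Prop := ∀ (n : Int) (target : Int) (prime_cache : Option (List Int)), Dom_n_primes_digits n target prime_cache → Pre_n_primes_digits n target prime_cache → D_n_primes_digits n target prime_cache → n_primes_digits n target prime_cache ≠ n_primes_digits_alt n target prime_cache
-- ===== LEMMAS AND PROOFS =====

lemma pvToDigitsCore_lt (b : Nat) : ∀ (fuel n : Nat) (ds : List Char), 0 < fuel →
    ds.length < (Nat.toDigitsCore b fuel n ds).length := by
  intro fuel
  induction fuel with
  | zero => intro n ds h; omega
  | succ f ih =>
    intro n ds _
    simp only [Nat.toDigitsCore]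
    split
    · simp
    · cases f with
      | zero => simp [Nat.toDigitsCore]
      | succ f' => have := ih (n / b) (Nat.digitChar (n % b) :: ds) (by omega); simp at this ⊢; omega

lemma pvToChars_ne_nil (p : Int) : PySem.Int.toChars p ≠ [] := by
  unfold PySem.Int.toChars Nat.toDigits
  split
  · simp
  · have := pvToDigitsCore_lt 10 (p.toNat + 1) p.toNat [] (by omega)
    intro h; rw [h] at this; simp at this

lemma pvToChars_len_pos (p : Int) : 1 ≤ ((PySem.Int.toChars p).length : Int) := by
  have h := pvToChars_ne_nil p
  have : 0 < (PySem.Int.toChars p).length := List.length_pos_iff.mpr h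
  omega

lemma pvSlice_map (f : Char → Int) (xs : List Char) (a b : Option Int) :
    PySem.List.slice (xs.map f) a b = (PySem.List.slice xs a b).map f := by
  simp [PySem.List.slice, List.map_take, List.map_drop]

lemma pvSlice_to_nil {α : Type} (xs : List α) (t : Int) (h : t + (xs.length : Int) ≤ 0 ∨ t = 0) :
    PySem.List.slice xs none (some t) = [] := by
  have hb : PySem.List.clampIdx xs.length t = 0 := by
    unfold PySem.List.clampIdx; split_ifs <;> omega
  simp [PySem.List.slice, hb]

-- ---- digit-extraction bridge: B's divmod digits are A's str digits ----

-- the decimal digit list of a positive natural, most significant first (proof-side spec)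
def natDigs (m : Nat) : List Int :=
  if m < 10 then [(m : Int)] else natDigs (m / 10) ++ [((m % 10 : Nat) : Int)]
decreasing_by exact Nat.div_lt_self (by omega) (by omega)

lemma pvDigit_digitChar (r : Nat) (hr : r < 10) : pvDigit (Nat.digitChar r) = (r : Int) := by
  interval_cases r <;> decide

lemma pvMapToDigitsCore : ∀ m : Nat, ∀ fuel, m + 1 ≤ fuel → ∀ cs,
    (Nat.toDigitsCore 10 fuel m cs).map pvDigit = natDigs m ++ cs.map pvDigit := by
  intro m
  induction m using Nat.strong_induction_on with
  | _ m ih =>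
    intro fuel hf cs
    obtain ⟨f, rfl⟩ : ∃ f, fuel = f + 1 := ⟨fuel - 1, by omega⟩
    by_cases h : m < 10
    · have h10 : m / 10 = 0 := Nat.div_eq_of_lt h
      have hm : m % 10 = m := Nat.mod_eq_of_lt h
      simp [Nat.toDigitsCore, h10, hm, natDigs, h, pvDigit_digitChar m h]
    · have h10 : m / 10 ≠ 0 := by omega
      have hrec := ih (m / 10) (by omega) f (by omega) (Nat.digitChar (m % 10) :: cs)
      simp only [Nat.toDigitsCore, h10, if_false]
      rw [hrec]
      rw [show natDigs m = natDigs (m / 10) ++ [((m % 10 : Nat) : Int)] from by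
        rw [natDigs]; simp [h]]
      simp [pvDigit_digitChar (m % 10) (by omega)]

lemma pvDigitsCore_zero : ∀ (f : Nat) (ds : List Int), pvDigitsCore f 0 ds = ds := by
  intro f ds; cases f <;> simp [pvDigitsCore]

lemma pvDigitsCore_eq : ∀ m : Nat, 0 < m → ∀ fuel, m ≤ fuel → ∀ ds,
    pvDigitsCore fuel (m : Int) ds = ds ++ (natDigs m).reverse := by
  intro m
  induction m using Nat.strong_induction_on with
  | _ m ih =>
    intro hm fuel hf ds
    obtain ⟨f, rfl⟩ : ∃ f, fuel = f + 1 := ⟨fuel - 1, by omega⟩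
    have hdiv : PySem.Int.floordiv (m : Int) 10 = ((m / 10 : Nat) : Int) := by
      exact_mod_cast PySem.Int.floordiv_natCast m 10
    have hmod : PySem.Int.mod (m : Int) 10 = ((m % 10 : Nat) : Int) := by
      exact_mod_cast PySem.Int.mod_natCast m 10
    simp only [pvDigitsCore, show (0:Int) < (m:Int) from by exact_mod_cast hm, if_true, hdiv, hmod]
    by_cases h : m < 10
    · have h10 : m / 10 = 0 := Nat.div_eq_of_lt h
      have hmm : m % 10 = m := Nat.mod_eq_of_lt h
      rw [h10, hmm]
      simp [pvDigitsCore_zero, natDigs, h]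
    · have hrec := ih (m / 10) (Nat.div_lt_self (by omega) (by omega)) (by omega) f (by omega)
        (ds ++ [((m % 10 : Nat) : Int)])
      rw [hrec]
      rw [show natDigs m = natDigs (m / 10) ++ [((m % 10 : Nat) : Int)] from by
        rw [natDigs]; simp [h]]
      simp

lemma pvDigitsB_eq (p : Int) (hp : 0 ≤ p) :
    pvDigitsB p = (PySem.Int.toChars p).map pvDigit := by
  by_cases h0 : p = 0
  · subst h0; decide
  · obtain ⟨m, rfl⟩ : ∃ m : Nat, p = (m : Int) := ⟨p.toNat, by omega⟩
    have hm : 0 < m := by omega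
    unfold pvDigitsB PySem.Int.toChars Nat.toDigits
    rw [if_neg h0, if_neg (by omega : ¬ (m : Int) < 0)]
    simp only [Int.toNat_natCast]
    rw [pvDigitsCore_eq m hm m (le_refl m) [], pvMapToDigitsCore m (m + 1) (le_refl _) []]
    simp

-- ---- loop-shape lemmas for the two ports ----

lemma pvBPrimes_stop {target : Int} {xs res : List Int} (h : target ≤ (res.length : Int)) :
    pvBPrimes target xs res = res := by
  unfold pvBPrimes; rw [if_neg (not_lt.mpr h)]

lemma pvBPrimes_nil {target : Int} {res : List Int} : pvBPrimes target [] res = res := by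
  unfold pvBPrimes; split <;> rfl

lemma pvBPrimes_cons {target p : Int} {ps res : List Int} (h : (res.length : Int) < target) :
    pvBPrimes target (p :: ps) res = pvBPrimes target ps (res ++ pvDigitsB p) := by
  conv_lhs => rw [pvBPrimes]
  rw [if_pos h]

lemma pvBMults_stop {n target : Int} {fuel : Nat} {j : Int} {res : List Int}
    (h : target ≤ (res.length : Int)) : pvBMults n target fuel j res = res := by
  cases fuel with
  | zero => rfl
  | succ f => simp [pvBMults, not_lt.mpr h]

lemma pvBMults_step {n target : Int} {fuel : Nat} {j : Int} {res : List Int}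
    (h : (res.length : Int) < target) :
    pvBMults n target (fuel + 1) j res
      = pvBMults n target fuel (j + 1)
          (res ++ pvDigitsB (n * (j + PySem.Int.floordiv (j - 1) (n - 1)))) := by
  simp [pvBMults, h]

lemma pvAMults_stop {n target : Int} {fuel : Nat} {k total : Int} {parts : List (List Char)}
    (h : target ≤ total) : pvAMults n target fuel k total parts = parts := by
  cases fuel with
  | zero => rfl
  | succ f => simp [pvAMults, not_lt.mpr h]

lemma pvAMults_step_skip {n target : Int} {fuel : Nat} {k total : Int} {parts : List (List Char)}
    (h1 : total < target) (h2 : PySem.Int.mod k n = 0) :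
    pvAMults n target (fuel + 1) k total parts = pvAMults n target fuel (k + 1) total parts := by
  simp [pvAMults, h1, h2]

lemma pvAMults_step_app {n target : Int} {fuel : Nat} {k total : Int} {parts : List (List Char)}
    (h1 : total < target) (h2 : PySem.Int.mod k n ≠ 0) :
    pvAMults n target (fuel + 1) k total parts
      = pvAMults n target fuel (k + 1) (total + ((PySem.Int.toChars (n * k)).length : Int))
          (parts ++ [PySem.Int.toChars (n * k)]) := by
  simp [pvAMults, h1, h2]

lemma pvAPrimes_cons_stop {target : Int} {p : Int} {ps : List Int} {total : Int}
    {parts : List (List Char)} (h : target ≤ total + ((PySem.Int.toChars p).length : Int)) :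
    pvAPrimes target (p :: ps) total parts = parts ++ [PySem.Int.toChars p] := by
  simp [pvAPrimes, h]

lemma pvAPrimes_cons_go {target : Int} {p : Int} {ps : List Int} {total : Int}
    {parts : List (List Char)} (h : ¬ target ≤ total + ((PySem.Int.toChars p).length : Int)) :
    pvAPrimes target (p :: ps) total parts
      = pvAPrimes target ps (total + ((PySem.Int.toChars p).length : Int))
          (parts ++ [PySem.Int.toChars p]) := by
  simp [pvAPrimes, h]

-- ---- the closed-form rank formula k_j = j + (j-1)//(n-1) ----

def pvK (n j : Int) : Int := j + PySem.Int.floordiv (j - 1) (n - 1)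

lemma pvK_one (n : Int) (hn : 2 ≤ n) : pvK n 1 = 1 := by
  unfold pvK
  rw [show (1:Int) - 1 = 0 from rfl, PySem.Int.floordiv_eq_ediv_of_pos (by omega), Int.zero_ediv]
  norm_num

-- pvK n j is ≥ 1, never divisible by n, and steps to pvK n (j+1) by +1 (next candidate
-- not a multiple of n) or by +2 (next candidate a multiple of n) — exactly A's loop steps
lemma pvK_props (n j : Int) (hn : 2 ≤ n) (hj : 1 ≤ j) :
    1 ≤ pvK n j ∧ PySem.Int.mod (pvK n j) n ≠ 0 ∧
      ((PySem.Int.mod (pvK n j + 1) n ≠ 0 ∧ pvK n (j + 1) = pvK n j + 1) ∨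
       (PySem.Int.mod (pvK n j + 1) n = 0 ∧ pvK n (j + 1) = pvK n j + 2)) := by
  have hd : (0:Int) < n - 1 := by omega
  have hq : (n - 1) * ((j - 1) / (n - 1)) + (j - 1) % (n - 1) = j - 1 := Int.ediv_add_emod _ _
  set q := (j - 1) / (n - 1) with hqdef
  set r := (j - 1) % (n - 1) with hrdef
  have hr0 : 0 ≤ r := Int.emod_nonneg _ (by omega)
  have hr1 : r < n - 1 := Int.emod_lt_of_pos _ hd
  have hq0 : 0 ≤ q := Int.ediv_nonneg (by omega) (by omega)
  clear_value q r
  have hK : pvK n j = n * q + r + 1 := by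
    unfold pvK
    rw [PySem.Int.floordiv_eq_ediv_of_pos hd, ← hqdef]
    linear_combination -hq
  have hnq : 0 ≤ n * q := mul_nonneg (by omega) hq0
  have hK' : pvK n (j + 1) = j + 1 + j / (n - 1) := by
    unfold pvK
    rw [show j + 1 - 1 = j from by ring, PySem.Int.floordiv_eq_ediv_of_pos hd]
  refine ⟨by omega, ?_, ?_⟩
  · have : PySem.Int.mod (pvK n j) n = r + 1 := by
      rw [hK, PySem.Int.mod_eq_emod_of_pos (by omega),
        show n * q + r + 1 = (r + 1) + n * q from by ring, Int.add_mul_emod_self_left]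
      exact Int.emod_eq_of_lt (by omega) (by omega)
    omega
  · by_cases hc : r + 1 < n - 1
    · left
      have hdiv : j / (n - 1) = q := by
        rw [show j = (r + 1) + q * (n - 1) from by linear_combination -hq,
          Int.add_mul_ediv_right _ _ (by omega : n - 1 ≠ 0),
          Int.ediv_eq_zero_of_lt (by omega) (by omega), zero_add]
      constructor
      · have : PySem.Int.mod (pvK n j + 1) n = r + 2 := by
          rw [hK, PySem.Int.mod_eq_emod_of_pos (by omega),
            show n * q + r + 1 + 1 = (r + 2) + n * q from by ring, Int.add_mul_emod_self_left]
          exact Int.emod_eq_of_lt (by omega) (by omega)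
        omega
      · rw [hK', hdiv, hK]; linear_combination -hq
    · right
      have hr2 : r = n - 2 := by omega
      have hdiv : j / (n - 1) = q + 1 := by
        rw [show j = (q + 1) * (n - 1) from by linear_combination -hq + hr2,
          Int.mul_ediv_cancel _ (by omega : n - 1 ≠ 0)]
      constructor
      · rw [hK, PySem.Int.mod_eq_emod_of_pos (by omega),
          show n * q + r + 1 + 1 = n * (q + 1) from by linear_combination hr2]
        exact Int.mul_emod_right n (q + 1)
      · rw [hK', hdiv, hK]; linear_combination -hq

-- ---- the n==1 branches agree on the full (unsliced) digit sequence ----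
lemma pvPrimes_agree (target : Int) :
    ∀ (xs : List Int), (∀ p ∈ xs, 0 ≤ p) → ∀ (acc : List (List Char)),
      (acc.flatten.length : Int) < target →
      pvBPrimes target xs (acc.flatten.map pvDigit)
        = (pvAPrimes target xs (acc.flatten.length : Int) acc).flatten.map pvDigit := by
  intro xs
  induction xs with
  | nil =>
    intro _ acc hlt
    rw [pvBPrimes_nil]
    simp [pvAPrimes]
  | cons p ps ih =>
    intro hpos acc hlt
    rw [pvBPrimes_cons (by simpa only [List.length_map] using hlt),
      pvDigitsB_eq p (hpos p (by simp))]
    have hs := pvToChars_len_pos p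
    by_cases hstop : target ≤ (acc.flatten.length : Int) + ((PySem.Int.toChars p).length : Int)
    · rw [pvAPrimes_cons_stop hstop,
        pvBPrimes_stop (by simp only [List.length_append, List.length_map]; push_cast; omega)]
      simp [List.flatten_append]
    · rw [pvAPrimes_cons_go hstop]
      have hlen2 : (((acc ++ [PySem.Int.toChars p]).flatten.length : Nat) : Int)
          = (acc.flatten.length : Int) + ((PySem.Int.toChars p).length : Int) := by
        simp [List.flatten_append]
      have key := ih (fun q hq => hpos q (by simp [hq])) (acc ++ [PySem.Int.toChars p])
        (by rw [hlen2]; omega)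
      rw [hlen2] at key
      have harg : (acc ++ [PySem.Int.toChars p]).flatten.map pvDigit
          = acc.flatten.map pvDigit ++ (PySem.Int.toChars p).map pvDigit := by
        simp [List.flatten_append]
      rw [harg] at key
      exact key

-- ---- the n≠1 branches agree on the full (unsliced) digit sequence when 2 ≤ n ----
lemma pvMults_agree (n target : Int) (hn : 2 ≤ n) :
    ∀ (fb fa : Nat) (j : Int) (acc : List (List Char)),
      1 ≤ j →
      (acc.flatten.length : Int) < target →
      (target - acc.flatten.length).toNat < fb →
      2 * (target - acc.flatten.length).toNat ≤ fa →
      pvBMults n target fb j (acc.flatten.map pvDigit)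
        = (pvAMults n target fa (pvK n j) (acc.flatten.length : Int) acc).flatten.map pvDigit := by
  intro fb
  induction fb with
  | zero => intro fa j acc hj hlt hfb hfa; exact absurd hfb (by omega)
  | succ f ih =>
    intro fa j acc hj hlt hfb hfa
    obtain ⟨hk1, hkmod, hdich⟩ := pvK_props n j hn hj
    have hk0 : 0 ≤ n * pvK n j := mul_nonneg (by omega) (by omega)
    rw [pvBMults_step (by simpa only [List.length_map] using hlt)]
    rw [show j + PySem.Int.floordiv (j - 1) (n - 1) = pvK n j from rfl]
    rw [pvDigitsB_eq _ hk0]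
    obtain ⟨m, rfl⟩ : ∃ m, fa = m + 1 := ⟨fa - 1, by omega⟩
    rw [pvAMults_step_app hlt hkmod]
    have hs := pvToChars_len_pos (n * pvK n j)
    by_cases hstop : target ≤ (acc.flatten.length : Int) + ((PySem.Int.toChars (n * pvK n j)).length : Int)
    · rw [pvAMults_stop hstop,
        pvBMults_stop (by simp only [List.length_append, List.length_map]; push_cast; omega)]
      simp [List.flatten_append]
    · have hlen2 : (((acc ++ [PySem.Int.toChars (n * pvK n j)]).flatten.length : Nat) : Int)
          = (acc.flatten.length : Int) + ((PySem.Int.toChars (n * pvK n j)).length : Int) := by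
        simp [List.flatten_append]
      have harg : (acc ++ [PySem.Int.toChars (n * pvK n j)]).flatten.map pvDigit
          = acc.flatten.map pvDigit ++ (PySem.Int.toChars (n * pvK n j)).map pvDigit := by
        simp [List.flatten_append]
      rcases hdich with ⟨hm1, heq1⟩ | ⟨hm0, heq2⟩
      · have key := ih m (j + 1) (acc ++ [PySem.Int.toChars (n * pvK n j)]) (by omega)
          (by rw [hlen2]; omega) (by rw [hlen2]; omega) (by rw [hlen2]; omega)
        rw [hlen2, harg, heq1] at key
        exact key
      · obtain ⟨m', rfl⟩ : ∃ m', m = m' + 1 := ⟨m - 1, by omega⟩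
        rw [pvAMults_step_skip (by omega) hm0]
        have key := ih m' (j + 1) (acc ++ [PySem.Int.toChars (n * pvK n j)]) (by omega)
          (by rw [hlen2]; omega) (by rw [hlen2]; omega) (by rw [hlen2]; omega)
        rw [hlen2, harg, heq2] at key
        rw [show pvK n j + 1 + 1 = pvK n j + 2 from by ring]
        exact key

-- ===== VERDICT (by name: the statement is the Claim_ definition above) =====
theorem n_primes_digits_spec : Claim_unchanged_n_primes_digits := by
  unfold Claim_unchanged_n_primes_digits
  intro n target pc _ hPre hD
  by_cases hn1 : n = 1
  · subst hn1
    obtain ⟨hsome, hpos⟩ := hPre.1 rfl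
    rcases pc with - | xs
    · simp at hsome
    · simp only [n_primes_digits, n_primes_digits_alt, Option.getD_some]
      simp only [if_true]
      by_cases ht : 0 < target
      · have key := pvPrimes_agree target xs (by simpa using hpos) [] (by simpa using ht)
        simp only [List.flatten_nil, List.map_nil, List.length_nil, Nat.cast_zero] at key
        rw [key, pvSlice_map]
      · push_neg at ht
        rw [pvBPrimes_stop (by simp <;> omega)]
        rw [pvSlice_to_nil ([] : List Int) target (Or.inl (by simp <;> omega))]
        cases xs with
        | nil =>
          rw [show pvAPrimes target [] 0 [] = [] from rfl]
          simp [PySem.List.slice]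
        | cons x xs' =>
          rw [pvAPrimes_cons_stop (by have := pvToChars_len_pos x; omega)]
          have hfl : (([] : List (List Char)) ++ [PySem.Int.toChars x]).flatten = PySem.Int.toChars x := by simp
          rw [hfl]
          have hnil : PySem.List.slice (PySem.Int.toChars x) none (some target) = [] := by
            apply pvSlice_to_nil
            rcases eq_or_lt_of_le ht with h0 | hneg
            · right; omega
            · left
              by_contra hc
              exact hD ⟨rfl, hneg, by push_neg at hc; simpa using hc⟩
          rw [hnil]
          simp
  · simp only [n_primes_digits, n_primes_digits_alt]
    rw [if_neg hn1, if_neg hn1]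
    by_cases ht : 0 < target
    · rcases hPre.2 hn1 with hge | hle
      · have key := pvMults_agree n target hge (target.toNat + 1) (2 * target.toNat + 2) 1 []
          (le_refl 1) (by simpa using ht) (by simp <;> omega) (by simp <;> omega)
        rw [pvK_one n hge] at key
        simp only [List.flatten_nil, List.map_nil, List.length_nil, Nat.cast_zero] at key
        rw [key, pvSlice_map]
      · omega
    · push_neg at ht
      rw [pvAMults_stop (by omega), pvBMults_stop (by simp <;> omega)]
      simp [PySem.List.slice]

theorem n_primes_digits_changed : Claim_changed_n_primes_digits := by
  unfold Claim_changed_n_primes_digits; decide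

theorem n_primes_digits_tight : Claim_exact_n_primes_digits := by
  unfold Claim_exact_n_primes_digits
  intro n target pc _ hPre hD
  obtain ⟨hn1, htneg, hlen⟩ := hD
  subst hn1
  obtain ⟨hsome, -⟩ := hPre.1 rfl
  rcases pc with - | xs
  · simp at hsome
  · rcases xs with - | ⟨x, xs'⟩
    · exfalso
      have h1 : (PySem.Int.toChars (((some ([] : List Int)).getD []).headD 0)).length = 1 := by decide
      rw [h1] at hlen
      omega
    · have hx1 : -target < ((PySem.Int.toChars x).length : Int) := by
        have hh : ((some (x :: xs')).getD []).headD 0 = x := by simp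
        rw [hh] at hlen; omega
      simp only [n_primes_digits, n_primes_digits_alt, Option.getD_some]
      simp only [if_true]
      rw [pvAPrimes_cons_stop (by have := pvToChars_len_pos x; omega)]
      rw [pvBPrimes_stop (by simp <;> omega)]
      rw [pvSlice_to_nil ([] : List Int) target (Or.inl (by simp <;> omega))]
      have hfl : (([] : List (List Char)) ++ [PySem.Int.toChars x]).flatten = PySem.Int.toChars x := by simp
      rw [hfl]
      have hk : target = -(((-target).toNat : Nat) : Int) := by omega
      rw [hk, PySem.List.slice_to_neg_natCast (PySem.Int.toChars x) (-target).toNat (by omega)]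
      intro hc
      have hlc := congrArg List.length hc
      simp [List.length_take] at hlc
      omega
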